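-- pv_equiv track=rewrite | github.com/andrewpeterson-dev/adaptive-trading-ecosystem | api/routes/explainer.py | _analyze_strengths
-- ===== SOURCE A (Python) =====
-- INDICATOR_TRAITS = {
--     "rsi": {"type": "momentum", "mean_reverting": True, "lag": "low", "category": "oscillator"},
--     "sma": {"type": "trend", "mean_reverting": False, "lag": "high", "category": "moving_average"},
--     "ema": {"type": "trend", "mean_reverting": False, "lag": "medium", "category": "moving_average"},
--     "macd": {"type": "momentum", "mean_reverting": False, "lag": "medium", "category": "trend_momentum"},
--     "bollinger_bands": {"type": "volatility", "mean_reverting": True, "lag": "medium", "category": "volatility"},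
--     "atr": {"type": "volatility", "mean_reverting": False, "lag": "low", "category": "volatility"},
--     "vwap": {"type": "volume", "mean_reverting": True, "lag": "low", "category": "volume_price"},
--     "stochastic": {"type": "momentum", "mean_reverting": True, "lag": "low", "category": "oscillator"},
--     "obv": {"type": "volume", "mean_reverting": False, "lag": "low", "category": "volume"},
-- }
--
-- def _analyze_strengths(indicators: list[dict]) -> list[str]:
--     strengths = []
--     categories = set()
--     for ind in indicators:
--         traits = INDICATOR_TRAITS.get(ind["name"], {})
--         categories.add(traits.get("category", "unknown"))
--
--     if len(categories) >= 2:
--         strengths.append("Uses indicators from multiple categories, providing signal diversification")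
--     if any(INDICATOR_TRAITS.get(i["name"], {}).get("type") == "volume" for i in indicators):
--         strengths.append("Includes volume confirmation, which reduces false breakout signals")
--     if any(INDICATOR_TRAITS.get(i["name"], {}).get("mean_reverting") for i in indicators):
--         strengths.append("Incorporates mean-reversion logic, effective in ranging markets")
--     if any(INDICATOR_TRAITS.get(i["name"], {}).get("lag") == "low" for i in indicators):
--         strengths.append("Uses low-lag indicators for faster signal generation")
--     if len(indicators) >= 2:
--         strengths.append("Multi-indicator confirmation reduces false signal rate")
--     if not strengths:
--         strengths.append("Simple strategy with clear, interpretable logic")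
--     return strengths
-- ===== SOURCE B (Python) =====
-- INDICATOR_TRAITS = {
--     "rsi": {"type": "momentum", "mean_reverting": True, "lag": "low", "category": "oscillator"},
--     "sma": {"type": "trend", "mean_reverting": False, "lag": "high", "category": "moving_average"},
--     "ema": {"type": "trend", "mean_reverting": False, "lag": "medium", "category": "moving_average"},
--     "macd": {"type": "momentum", "mean_reverting": False, "lag": "medium", "category": "trend_momentum"},
--     "bollinger_bands": {"type": "volatility", "mean_reverting": True, "lag": "medium", "category": "volatility"},
--     "atr": {"type": "volatility", "mean_reverting": False, "lag": "low", "category": "volatility"},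
--     "vwap": {"type": "volume", "mean_reverting": True, "lag": "low", "category": "volume_price"},
--     "stochastic": {"type": "momentum", "mean_reverting": True, "lag": "low", "category": "oscillator"},
--     "obv": {"type": "volume", "mean_reverting": False, "lag": "low", "category": "volume"},
-- }
--
-- def _analyze_strengths(indicators: list[dict]) -> list[str]:
--     # Single pass: gather every condition while walking the indicator list once.
--     categories = set()
--     has_volume = has_mean_reverting = has_low_lag = False
--     n = 0
--     for ind in indicators:
--         traits = INDICATOR_TRAITS.get(ind["name"], {})
--         categories.add(traits.get("category", "unknown"))
--         has_volume = has_volume or traits.get("type") == "volume"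
--         has_mean_reverting = has_mean_reverting or bool(traits.get("mean_reverting"))
--         has_low_lag = has_low_lag or traits.get("lag") == "low"
--         n += 1
--     strengths = (
--         (["Uses indicators from multiple categories, providing signal diversification"] if len(categories) >= 2 else [])
--         + (["Includes volume confirmation, which reduces false breakout signals"] if has_volume else [])
--         + (["Incorporates mean-reversion logic, effective in ranging markets"] if has_mean_reverting else [])
--         + (["Uses low-lag indicators for faster signal generation"] if has_low_lag else [])
--         + (["Multi-indicator confirmation reduces false signal rate"] if n >= 2 else [])
--     )
--     return strengths or ["Simple strategy with clear, interpretable logic"]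
-- ===== Notes on version B (the rewrite author's own statement) =====
-- stated objective: simpler
-- what changed: Replaces A's loop plus four separate any() scans over the indicator list with a single pass that accumulates the category set, three boolean flags and a count, then assembles the same strings in the same order.
import Mathlib
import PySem

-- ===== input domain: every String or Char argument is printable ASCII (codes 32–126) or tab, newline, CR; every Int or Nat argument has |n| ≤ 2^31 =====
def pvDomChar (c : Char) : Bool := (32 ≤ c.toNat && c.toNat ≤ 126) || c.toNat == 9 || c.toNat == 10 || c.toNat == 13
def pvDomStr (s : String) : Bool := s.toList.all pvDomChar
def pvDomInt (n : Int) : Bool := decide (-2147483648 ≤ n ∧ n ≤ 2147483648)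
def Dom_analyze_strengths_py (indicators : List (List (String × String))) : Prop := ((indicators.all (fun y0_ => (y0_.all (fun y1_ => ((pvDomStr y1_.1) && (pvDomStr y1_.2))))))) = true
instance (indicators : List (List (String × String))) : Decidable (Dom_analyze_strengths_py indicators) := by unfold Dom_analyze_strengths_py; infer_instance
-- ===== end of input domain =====

-- B is a single-pass re-decomposition: one loop gathers all conditions instead of one loop plus four any() scans; return value only, no mutation.

-- Module constant INDICATOR_TRAITS, projected to the fields the function reads:
-- (type, mean_reverting, lag, category); none = name not in the dict.
def traitsGet (name : String) : Option (String × Bool × String × String) :=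
  if name = "rsi" then some ("momentum", true, "low", "oscillator")
  else if name = "sma" then some ("trend", false, "high", "moving_average")
  else if name = "ema" then some ("trend", false, "medium", "moving_average")
  else if name = "macd" then some ("momentum", false, "medium", "trend_momentum")
  else if name = "bollinger_bands" then some ("volatility", true, "medium", "volatility")
  else if name = "atr" then some ("volatility", false, "low", "volatility")
  else if name = "vwap" then some ("volume", true, "low", "volume_price")
  else if name = "stochastic" then some ("momentum", true, "low", "oscillator")
  else if name = "obv" then some ("volume", false, "low", "volume")
  else none

-- ===== PORT A =====
-- ind["name"] raises KeyError when absent (excluded by Pre_); here the lookup is total via getD "" ("" is no traits key).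
def analyze_strengths_py (indicators : List (List (String × String))) : List String :=
  let categories := indicators.foldl
    (fun s ind =>
      PySem.Set.add s
        (match traitsGet (((PySem.Dict.mk ind).get? "name").getD "") with
          | some t => t.2.2.2
          | none => "unknown"))
    PySem.Set.empty
  let strengths : List String := []
  let strengths := if PySem.Set.len categories ≥ 2 then strengths ++ ["Uses indicators from multiple categories, providing signal diversification"] else strengths
  let strengths := if indicators.any (fun i => (traitsGet (((PySem.Dict.mk i).get? "name").getD "")).elim false (fun t => t.1 == "volume")) then strengths ++ ["Includes volume confirmation, which reduces false breakout signals"] else strengths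
  let strengths := if indicators.any (fun i => (traitsGet (((PySem.Dict.mk i).get? "name").getD "")).elim false (fun t => t.2.1)) then strengths ++ ["Incorporates mean-reversion logic, effective in ranging markets"] else strengths
  let strengths := if indicators.any (fun i => (traitsGet (((PySem.Dict.mk i).get? "name").getD "")).elim false (fun t => t.2.2.1 == "low")) then strengths ++ ["Uses low-lag indicators for faster signal generation"] else strengths
  let strengths := if indicators.length ≥ 2 then strengths ++ ["Multi-indicator confirmation reduces false signal rate"] else strengths
  if strengths = [] then ["Simple strategy with clear, interpretable logic"] else strengths

-- ===== PORT B =====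
def altStep (st : PySem.Set String × Bool × Bool × Bool × Nat) (ind : List (String × String)) :
    PySem.Set String × Bool × Bool × Bool × Nat :=
  let t := traitsGet (((PySem.Dict.mk ind).get? "name").getD "")
  (PySem.Set.add st.1 (t.elim "unknown" (fun x => x.2.2.2)),
   st.2.1 || t.elim false (fun x => x.1 == "volume"),
   st.2.2.1 || t.elim false (fun x => x.2.1),
   st.2.2.2.1 || t.elim false (fun x => x.2.2.1 == "low"),
   st.2.2.2.2 + 1)

def analyze_strengths_py_alt (indicators : List (List (String × String))) : List String :=
  let st := indicators.foldl altStep (PySem.Set.empty, false, false, false, 0)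
  let strengths :=
    (if PySem.Set.len st.1 ≥ 2 then ["Uses indicators from multiple categories, providing signal diversification"] else [])
    ++ (if st.2.1 then ["Includes volume confirmation, which reduces false breakout signals"] else [])
    ++ (if st.2.2.1 then ["Incorporates mean-reversion logic, effective in ranging markets"] else [])
    ++ (if st.2.2.2.1 then ["Uses low-lag indicators for faster signal generation"] else [])
    ++ (if st.2.2.2.2 ≥ 2 then ["Multi-indicator confirmation reduces false signal rate"] else [])
  if strengths = [] then ["Simple strategy with clear, interpretable logic"] else strengths

-- ===== PRECONDITION & SPEC =====
-- Pre_ excludes exactly the inputs where ind["name"] raises KeyError (a dict without the "name" key).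
def Pre_analyze_strengths_py (indicators : List (List (String × String))) : Prop :=
  (indicators.all (fun ind => ((PySem.Dict.mk ind).get? "name").isSome)) = true
instance (indicators : List (List (String × String))) : Decidable (Pre_analyze_strengths_py indicators) := by unfold Pre_analyze_strengths_py; infer_instance

def pvWitness_analyze_strengths_py : (List (List (String × String))) := [[("name", "rsi")], [("name", "obv")]]

def Spec_analyze_strengths_py (indicators : List (List (String × String))) (out : List String) : Prop := out = analyze_strengths_py_alt indicators
instance (indicators : List (List (String × String))) (out : List String) : Decidable (Spec_analyze_strengths_py indicators out) := by unfold Spec_analyze_strengths_py; infer_instance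

-- ===== CLAIM (what is proved, stated in full; the proofs are below) =====
def Claim_equal_analyze_strengths_py : Prop := ∀ (indicators : List (List (String × String))), Dom_analyze_strengths_py indicators → Pre_analyze_strengths_py indicators → Spec_analyze_strengths_py indicators (analyze_strengths_py indicators)

-- ===== LEMMAS AND PROOFS =====

-- B's single fold computes A's categories fold, the three any-scans and the length.
theorem altStep_foldl (l : List (List (String × String)))
    (s : PySem.Set String) (b1 b2 b3 : Bool) (n : Nat) :
    l.foldl altStep (s, b1, b2, b3, n) =
      (l.foldl (fun s ind =>
          PySem.Set.add s
            (match traitsGet (((PySem.Dict.mk ind).get? "name").getD "") with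
              | some t => t.2.2.2
              | none => "unknown")) s,
       b1 || l.any (fun i => (traitsGet (((PySem.Dict.mk i).get? "name").getD "")).elim false (fun t => t.1 == "volume")),
       b2 || l.any (fun i => (traitsGet (((PySem.Dict.mk i).get? "name").getD "")).elim false (fun t => t.2.1)),
       b3 || l.any (fun i => (traitsGet (((PySem.Dict.mk i).get? "name").getD "")).elim false (fun t => t.2.2.1 == "low")),
       n + l.length) := by
  induction l generalizing s b1 b2 b3 n with
  | nil => simp
  | cons hd tl ih =>
    simp only [List.foldl_cons, List.any_cons, List.length_cons, ih, altStep]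
    refine congrArg₂ _ ?_ ?_
    · cases traitsGet (((PySem.Dict.mk hd).get? "name").getD "") <;> rfl
    · refine congrArg₂ _ (by simp [Bool.or_assoc]) ?_
      refine congrArg₂ _ (by simp [Bool.or_assoc]) ?_
      refine congrArg₂ _ (by simp [Bool.or_assoc]) (by omega)

-- ===== VERDICT (by name: the statement is the Claim_ definition above) =====
theorem analyze_strengths_py_spec : Claim_equal_analyze_strengths_py := by
  intro indicators _ _
  unfold Spec_analyze_strengths_py analyze_strengths_py analyze_strengths_py_alt
  rw [altStep_foldl]
  simp only [Nat.zero_add, Bool.false_or]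
  by_cases h1 : PySem.Set.len (List.foldl (fun s ind =>
      PySem.Set.add s (match traitsGet (((PySem.Dict.mk ind).get? "name").getD "") with
        | some t => t.2.2.2 | none => "unknown")) PySem.Set.empty indicators) ≥ 2 <;>
  by_cases h2 : (indicators.any fun i =>
      (traitsGet (((PySem.Dict.mk i).get? "name").getD "")).elim false fun t => t.1 == "volume") = true <;>
  by_cases h3 : (indicators.any fun i =>
      (traitsGet (((PySem.Dict.mk i).get? "name").getD "")).elim false fun t => t.2.1) = true <;>
  by_cases h4 : (indicators.any fun i =>
      (traitsGet (((PySem.Dict.mk i).get? "name").getD "")).elim false fun t => t.2.2.1 == "low") = true <;>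
  by_cases h5 : indicators.length ≥ 2 <;>
  simp [h1, h2, h3, h4, h5]
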